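-- pv_equiv track=rewrite | github.com/lucasvtiradentes/doc-trace | src/doctrace/core/parser.py | _get_frontmatter_section
-- ===== SOURCE A (Python) =====
-- def _get_frontmatter_section(lines: list[str]) -> list[tuple[int, str]]:
--     if not lines or lines[0].strip() != "---":
--         return []
--     end_line = None
--     for i, line in enumerate(lines[1:], start=1):
--         if line.strip() == "---":
--             end_line = i
--             break
--     if end_line is None:
--         return []
--     return [(i + 1, line) for i, line in enumerate(lines) if 0 < i < end_line]
-- ===== SOURCE B (Python) =====
-- def _get_frontmatter_section(lines: list[str]) -> list[tuple[int, str]]: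
--     if not lines or lines[0].strip() != "---":
--         return []
--     result = []
--     for i, line in enumerate(lines[1:], start=1):
--         if line.strip() == "---":
--             return result
--         result.append((i + 1, line))
--     return []
-- ===== Notes on version B (the rewrite author's own statement) =====
-- stated objective: simpler
-- what changed: Single accumulating scan from index 1 that returns the accumulated numbered lines on hitting the closing '---', instead of A's two passes (locate end_line, then filter-renumber all lines).
import Mathlib
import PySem

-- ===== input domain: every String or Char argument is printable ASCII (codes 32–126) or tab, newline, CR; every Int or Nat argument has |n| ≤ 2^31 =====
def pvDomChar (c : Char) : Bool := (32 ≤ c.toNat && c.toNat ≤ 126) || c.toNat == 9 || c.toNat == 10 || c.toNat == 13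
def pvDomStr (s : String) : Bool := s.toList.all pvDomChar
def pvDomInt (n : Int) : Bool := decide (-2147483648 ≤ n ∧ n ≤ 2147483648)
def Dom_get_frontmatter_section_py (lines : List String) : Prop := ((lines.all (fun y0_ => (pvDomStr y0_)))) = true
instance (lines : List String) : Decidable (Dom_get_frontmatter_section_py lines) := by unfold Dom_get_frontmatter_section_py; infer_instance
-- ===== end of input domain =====

-- B replaces A's two passes (find end_line, then filter-renumber all lines) by one
-- accumulating scan from index 1 that returns the accumulation at the closing '---'.

-- ===== PORT A =====
-- A's 'for i, line in enumerate(lines[1:], start=1): if line.strip()=="---": end_line=i; break'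
def pvAFind (i : Int) : List String → Option Int
  | [] => none
  | l :: ls => if PySem.Str.strip l = "---" then some i else pvAFind (i + 1) ls

-- A's comprehension '[(i+1, line) for i, line in enumerate(lines) if 0 < i < end_line]'
def pvAFilter (i : Int) (e : Int) : List String → List (Int × String)
  | [] => []
  | l :: ls => if 0 < i ∧ i < e then (i + 1, l) :: pvAFilter (i + 1) e ls
               else pvAFilter (i + 1) e ls

def get_frontmatter_section_py (lines : List String) : List (Int × String) :=
  match lines with
  | [] => []
  | l0 :: _ =>
    if PySem.Str.strip l0 ≠ "---" then []
    else
      match pvAFind 1 (PySem.List.slice lines (some 1) none) with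
      | none => []
      | some e => pvAFilter 0 e lines

-- ===== PORT B =====
-- B's loop: accumulate (i+1, line); return acc at the closing '---'; [] if none found.
def pvBLoop (i : Int) (acc : List (Int × String)) : List String → List (Int × String)
  | [] => []
  | l :: ls => if PySem.Str.strip l = "---" then acc
               else pvBLoop (i + 1) (acc ++ [(i + 1, l)]) ls

def get_frontmatter_section_py_alt (lines : List String) : List (Int × String) :=
  match lines with
  | [] => []
  | l0 :: rest =>
    if PySem.Str.strip l0 ≠ "---" then []
    else pvBLoop 1 [] rest

-- ===== PRECONDITION & SPEC =====
def Spec_get_frontmatter_section_py (lines : List String) (out : List (Int × String)) : Prop := out = get_frontmatter_section_py_alt lines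
instance (lines : List String) (out : List (Int × String)) : Decidable (Spec_get_frontmatter_section_py lines out) := by unfold Spec_get_frontmatter_section_py; infer_instance

-- ===== CLAIM (what is proved, stated in full; the proofs are below) =====
def Claim_equal_get_frontmatter_section_py : Prop := ∀ (lines : List String), Dom_get_frontmatter_section_py lines → Spec_get_frontmatter_section_py lines (get_frontmatter_section_py lines)

-- ===== LEMMAS AND PROOFS =====

theorem pvAFilter_ge (ls : List String) : ∀ (i e : Int), e ≤ i → pvAFilter i e ls = [] := by
  induction ls with
  | nil => intro i e _; rfl
  | cons l ls ih =>
    intro i e h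
    simp only [pvAFilter]
    rw [if_neg (by omega)]
    exact ih (i + 1) e (by omega)

theorem pvAFind_ge (ls : List String) : ∀ (i e : Int), pvAFind i ls = some e → i ≤ e := by
  induction ls with
  | nil => intro i e h; simp [pvAFind] at h
  | cons l ls ih =>
    intro i e h
    simp only [pvAFind] at h
    split at h
    · cases h; omega
    · have := ih (i + 1) e h; omega

theorem pvLoop_eq (ls : List String) : ∀ (i : Int) (acc : List (Int × String)), 1 ≤ i →
    pvBLoop i acc ls =
      (match pvAFind i ls with
       | none => []
       | some e => acc ++ pvAFilter i e ls) := by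
  induction ls with
  | nil => intro i acc _; rfl
  | cons l ls ih =>
    intro i acc hi
    simp only [pvBLoop, pvAFind]
    by_cases h : PySem.Str.strip l = "---"
    · rw [if_pos h, if_pos h]
      simp only [pvAFilter]
      rw [if_neg (by omega), pvAFilter_ge ls (i + 1) i (by omega)]
      simp
    · rw [if_neg h, if_neg h]
      rw [ih (i + 1) (acc ++ [(i + 1, l)]) (by omega)]
      cases hfind : pvAFind (i + 1) ls with
      | none => simp
      | some e =>
        have he : i + 1 ≤ e := pvAFind_ge ls (i + 1) e hfind
        simp only [pvAFilter]
        rw [if_pos (by omega)]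
        simp

-- ===== VERDICT (by name: the statement is the Claim_ definition above) =====
theorem get_frontmatter_section_py_spec : Claim_equal_get_frontmatter_section_py := by
  intro lines _
  unfold Spec_get_frontmatter_section_py
  cases lines with
  | nil => rfl
  | cons l0 rest =>
    simp only [get_frontmatter_section_py, get_frontmatter_section_py_alt]
    by_cases h : PySem.Str.strip l0 = "---"
    · rw [if_neg (by simp [h]), if_neg (by simp [h])]
      rw [show PySem.List.slice (l0 :: rest) (some 1) none = rest from PySem.List.slice_from_one _]
      rw [pvLoop_eq rest 1 [] (by omega)]
      cases hfind : pvAFind 1 rest with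
      | none => rfl
      | some e =>
        have he : (1:Int) ≤ e := pvAFind_ge rest 1 e hfind
        simp only [pvAFilter]
        rw [if_neg (by omega)]
        simp
    · rw [if_pos (by simp [h]), if_pos (by simp [h])]
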